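-- pv_equiv track=rewrite | github.com/javieroc/adventofcode | 2020/09/script2.py | find_summands
-- ===== SOURCE A (Python) =====
-- def find_summands(numbers: [int], num: int) -> (int, [int]):
--     accum = 0
--     summands = []
--     result = None
--     for x in numbers:
--         summands.append(x)
--         accum = accum + x
--         if accum == num:
--             result = num
--             break
--         if accum > num:
--             break
--     return (result, summands)
-- ===== SOURCE B (Python) =====
-- def find_summands(numbers, num):
--     # Build the running-sum table once, then search it for the first sum >= num.
--     prefix, t = [], 0
--     for x in numbers:
--         t += x
--         prefix.append(t)
--     hit = next(((i, p) for i, p in enumerate(prefix) if p >= num), None)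
--     if hit is None:
--         return (None, list(numbers))
--     i, p = hit
--     return (num if p == num else None, numbers[:i + 1])
-- ===== Notes on version B (the rewrite author's own statement) =====
-- stated objective: alternative
-- what changed: Replaced the single accumulate-and-break loop by a two-phase decomposition: build the full prefix-sum table first, then search it for the first entry >= num and slice numbers[:i+1], instead of accumulating, appending and breaking inside one loop.
import Mathlib
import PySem

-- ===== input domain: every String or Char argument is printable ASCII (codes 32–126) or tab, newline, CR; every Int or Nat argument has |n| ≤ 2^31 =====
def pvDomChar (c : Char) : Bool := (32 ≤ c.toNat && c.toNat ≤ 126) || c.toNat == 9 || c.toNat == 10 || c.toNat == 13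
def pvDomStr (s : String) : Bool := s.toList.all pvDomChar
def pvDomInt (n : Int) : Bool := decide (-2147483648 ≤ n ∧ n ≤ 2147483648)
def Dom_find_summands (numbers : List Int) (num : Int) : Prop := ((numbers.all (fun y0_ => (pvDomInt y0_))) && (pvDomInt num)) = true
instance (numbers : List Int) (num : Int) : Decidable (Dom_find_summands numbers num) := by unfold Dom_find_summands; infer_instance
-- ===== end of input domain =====

-- B builds the full prefix-sum table first, then searches it for the first sum ≥ num (alternative decomposition, same cost).


-- ===== PORT A =====
-- the for-loop with accum/summands/result and the two break conditions, in order
def find_summands_go (num : Int) (numbers : List Int) (accum : Int) (summands : List Int) : Option Int × List Int :=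
  match numbers with
  | [] => (none, summands)
  | x :: rest =>
    let s := summands ++ [x]
    let a := accum + x
    if a = num then (some num, s)
    else if a > num then (none, s)
    else find_summands_go num rest a s

def find_summands (numbers : List Int) (num : Int) : Option Int × List Int :=
  find_summands_go num numbers 0 []

-- ===== PORT B =====
-- Source B's prefix-building loop (state: list built so far, running total)
def pvPrefixStep (st : List Int × Int) (x : Int) : List Int × Int :=
  (st.1 ++ [st.2 + x], st.2 + x)

def find_summands_alt (numbers : List Int) (num : Int) : Option Int × List Int :=
  match (PySem.List.enumerate ((numbers.foldl pvPrefixStep ([], 0)).1)).find? (fun ip => decide (ip.2 ≥ num)) with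
  | none => (none, numbers)
  | some ip => ((if ip.2 = num then some num else none),
                PySem.List.slice numbers none (some (ip.1 + 1)))  -- numbers[:i+1], i ≥ 0

-- ===== PRECONDITION & SPEC =====
def Spec_find_summands (numbers : List Int) (num : Int) (out : Option Int × List Int) : Prop := out = find_summands_alt numbers num
instance (numbers : List Int) (num : Int) (out : Option Int × List Int) : Decidable (Spec_find_summands numbers num out) := by unfold Spec_find_summands; infer_instance

-- ===== CLAIM (what is proved, stated in full; the proofs are below) =====
def Claim_equal_find_summands : Prop := ∀ (numbers : List Int) (num : Int), Dom_find_summands numbers num → Spec_find_summands numbers num (find_summands numbers num)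

-- ===== LEMMAS AND PROOFS =====

/-- prefix sums starting from a running total `acc` -/
def pvPrefixFrom (acc : Int) : List Int → List Int
  | [] => []
  | x :: r => (acc + x) :: pvPrefixFrom (acc + x) r

/-- first (index, value) of the prefix table with value ≥ num, Nat index -/
def pvHit (num : Int) : List Int → Option (Nat × Int)
  | [] => none
  | p :: r => if p ≥ num then some (0, p) else (pvHit num r).map (fun kq => (kq.1 + 1, kq.2))

theorem pvPrefix_foldl (l : List Int) : ∀ (pre : List Int) (t : Int),
    (l.foldl pvPrefixStep (pre, t)).1 = pre ++ pvPrefixFrom t l := by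
  induction l with
  | nil => intro pre t; simp [pvPrefixFrom]
  | cons x r ih => intro pre t; simp [pvPrefixStep, pvPrefixFrom, ih]

theorem pvEnum_find (num : Int) (xs : List Int) : ∀ (s : Int),
    (PySem.List.enumerate xs s).find? (fun ip => decide (ip.2 ≥ num)) =
      (pvHit num xs).map (fun kq => ((s + (kq.1 : Int), kq.2) : Int × Int)) := by
  induction xs with
  | nil => intro s; simp [PySem.List.enumerate_nil, pvHit]
  | cons p r ih =>
    intro s
    rw [PySem.List.enumerate_cons]
    by_cases h : p ≥ num
    · simp [List.find?, h, pvHit]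
    · simp only [List.find?, h, decide_false, ih (s + 1), pvHit]
      cases hh : pvHit num r with
      | none => simp
      | some kq =>
        simp [Prod.ext_iff]
        omega

theorem pvMain (num : Int) (l : List Int) : ∀ (acc : Int) (pre : List Int),
    find_summands_go num l acc pre =
      match pvHit num (pvPrefixFrom acc l) with
      | none => (none, pre ++ l)
      | some kp => ((if kp.2 = num then some num else none), pre ++ l.take (kp.1 + 1)) := by
  induction l with
  | nil => intro acc pre; simp [find_summands_go, pvPrefixFrom, pvHit]
  | cons x r ih =>
    intro acc pre
    by_cases h1 : acc + x = num
    · simp [find_summands_go, pvPrefixFrom, pvHit, h1]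
    · by_cases h2 : acc + x > num
      · have hge : acc + x ≥ num := le_of_lt h2
        simp [find_summands_go, pvPrefixFrom, pvHit, h1, h2, hge]
      · have hlt : ¬ (acc + x ≥ num) := by omega
        simp only [find_summands_go, pvPrefixFrom, pvHit, if_neg h1, if_neg h2, if_neg hlt]
        rw [ih (acc + x) (pre ++ [x])]
        cases hh : pvHit num (pvPrefixFrom (acc + x) r) with
        | none => simp
        | some kp => simp [List.take_succ_cons]

-- ===== VERDICT (by name: the statement is the Claim_ definition above) =====
theorem find_summands_spec : Claim_equal_find_summands := by
  intro numbers num _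
  unfold Spec_find_summands find_summands find_summands_alt
  rw [pvPrefix_foldl numbers [] 0, List.nil_append, pvEnum_find num _ 0, pvMain num numbers 0 []]
  cases hh : pvHit num (pvPrefixFrom 0 numbers) with
  | none => simp
  | some kp =>
    have h1 : ((kp.1 : Int)) + 1 = ((kp.1 + 1 : Nat) : Int) := by push_cast; ring
    simp only [Int.zero_add, Option.map_some, List.nil_append]
    rw [h1, PySem.List.slice_to_natCast]
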